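-- pv_equiv track=rewrite | github.com/mehuljain133/NP-COMPLETENESS-AND-APPROXIMATION-ALGORITHMS-PG-Projects | NPCompleteness.py | reduce_sat_to_3sat
-- ===== SOURCE A (Python) =====
-- def reduce_sat_to_3sat(clauses):
--     """
--     Converts a general CNF formula to an equivalent 3SAT formula.
--     Each clause is transformed to 3 literals using standard techniques.
--     """
--     def pad_clause(clause):
--         # Clause has < 3 literals: pad it with duplicates
--         while len(clause) < 3:
--             clause.append(clause[-1])
--         return clause
--
--     new_clauses = []
--     counter = 1
--
--     for clause in clauses:
--         if len(clause) == 3: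
--             new_clauses.append(clause)
--         elif len(clause) < 3:
--             new_clauses.append(pad_clause(clause.copy()))
--         else:
--             # Break clause with >3 literals into 3-literal clauses
--             new_vars = []
--             for i in range(len(clause) - 3):
--                 y = f"y{counter}"
--                 counter += 1
--                 new_vars.append(y)
--
--             # First clause
--             new_clauses.append([clause[0], clause[1], new_vars[0]])
--
--             # Middle clauses
--             for i in range(1, len(new_vars)):
--                 new_clauses.append([f"-{new_vars[i - 1]}", clause[i + 1], new_vars[i]])
--
--             # Last clause
--             new_clauses.append([f"-{new_vars[-1]}", clause[-2], clause[-1]])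
--
--     return new_clauses
-- ===== SOURCE B (Python) =====
-- def reduce_sat_to_3sat(clauses):
--     """Recursive 3SAT splitting: peel two literals and a fresh variable per level."""
--     def split(clause, counter):
--         n = len(clause)
--         if n == 3:
--             return [clause], counter
--         if n < 3:
--             padded = clause.copy()
--             while len(padded) < 3:
--                 padded.append(padded[-1])
--             return [padded], counter
--         y = f"y{counter}"
--         tail, counter = split([f"-{y}"] + clause[2:], counter + 1)
--         return [[clause[0], clause[1], y]] + tail, counter
--
--     result = []
--     counter = 1
--     for clause in clauses:
--         chunk, counter = split(clause, counter)
--         result += chunk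
--     return result
-- ===== Notes on version B (the rewrite author's own statement) =====
-- stated objective: alternative
-- what changed: Replaces A's index-arithmetic construction (pre-minting the whole list of fresh y-variables, then first/middle/last clauses via range indexing) with a recursive split(clause, counter) that peels two literals and one fresh variable per level, threading the counter through the return value.
import Mathlib
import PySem

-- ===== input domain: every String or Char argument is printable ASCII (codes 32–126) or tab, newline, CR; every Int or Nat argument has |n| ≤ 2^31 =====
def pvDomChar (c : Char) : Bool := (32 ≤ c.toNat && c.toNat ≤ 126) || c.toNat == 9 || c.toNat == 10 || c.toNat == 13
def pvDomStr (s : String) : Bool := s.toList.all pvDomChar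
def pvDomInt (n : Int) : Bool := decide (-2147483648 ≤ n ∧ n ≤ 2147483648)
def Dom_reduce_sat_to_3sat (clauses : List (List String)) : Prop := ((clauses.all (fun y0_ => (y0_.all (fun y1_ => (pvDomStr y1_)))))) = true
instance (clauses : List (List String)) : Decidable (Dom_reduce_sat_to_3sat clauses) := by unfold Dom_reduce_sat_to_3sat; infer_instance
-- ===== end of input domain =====

-- B replaces A's index-arithmetic >3-clause construction by a recursive split that peels
-- one fresh variable per level (objective: alternative decomposition, same cost).

-- ===== PORT A =====
-- pad_clause: 'while len(clause) < 3: clause.append(clause[-1])'; the while loop runs at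
-- most 3 times, so fuel 3 is exact.  On an empty clause Python raises IndexError
-- (clause[-1]); pyGet? returns none there and we stop (excluded by Pre_).
def padA : List String → Nat → List String
  | c, 0 => c
  | c, Nat.succ n =>
    if c.length < 3 then
      match PySem.List.pyGet? c (-1) with
      | some x => padA (c ++ [x]) n
      | none => c
    else c

-- the body of A's 'for clause in clauses' loop, acting on the state (new_clauses, counter)
def reduceStepA (st : List (List String) × Int) (clause : List String) :
    List (List String) × Int :=
  if clause.length = 3 then (st.1 ++ [clause], st.2)
  else if clause.length < 3 then (st.1 ++ [padA clause 3], st.2)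
  else
    -- new_vars loop: 'for i in range(len(clause) - 3): y = f"y{counter}"; counter += 1'
    let nv := (PySem.List.pyRange 0 ((clause.length : Int) - 3) 1).foldl
      (fun (p : List String × Int) _ => (p.1 ++ ["y" ++ PySem.Int.toStr p.2], p.2 + 1))
      ([], st.2)
    let new_vars := nv.1
    let counter := nv.2
    -- first clause
    let nc1 := st.1 ++ [[PySem.List.pyGetD clause 0 "", PySem.List.pyGetD clause 1 "",
                         PySem.List.pyGetD new_vars 0 ""]]
    -- middle clauses: 'for i in range(1, len(new_vars)): …'
    let nc2 := (PySem.List.pyRange 1 (new_vars.length : Int) 1).foldl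
      (fun acc i => acc ++ [["-" ++ PySem.List.pyGetD new_vars (i - 1) "",
                             PySem.List.pyGetD clause (i + 1) "",
                             PySem.List.pyGetD new_vars i ""]]) nc1
    -- last clause
    let nc3 := nc2 ++ [["-" ++ PySem.List.pyGetD new_vars (-1) "",
                        PySem.List.pyGetD clause (-2) "", PySem.List.pyGetD clause (-1) ""]]
    (nc3, counter)

def reduce_sat_to_3sat (clauses : List (List String)) : List (List String) :=
  (clauses.foldl reduceStepA ([], 1)).1

-- ===== PORT B =====
-- Source B's padding while-loop (inside split, < 3 case); on [] Python raises IndexError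
-- (excluded by Pre_), here getLast? is none and we stop.
def padB (c : List String) : List String :=
  if c.length < 3 then
    match c.getLast? with
    | some x => padB (c ++ [x])
    | none => c
  else c
termination_by 3 - c.length
decreasing_by simp; omega

-- Source B's recursive split(clause, counter)
def splitB (clause : List String) (counter : Int) : List (List String) × Int :=
  if clause.length = 3 then ([clause], counter)
  else if clause.length < 3 then ([padB clause], counter)
  else
    match clause with
    | a :: b :: tail =>
      let y := "y" ++ PySem.Int.toStr counter
      let r := splitB (("-" ++ y) :: tail) (counter + 1)
      ([a, b, y] :: r.1, r.2)
    | _ => ([clause], counter)  -- unreachable: clause.length > 3 here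
termination_by clause.length
decreasing_by simp

-- Source B's main loop body: 'chunk, counter = split(clause, counter); result += chunk'
def reduceStepB (st : List (List String) × Int) (clause : List String) :
    List (List String) × Int :=
  ((st.1 ++ (splitB clause st.2).1), (splitB clause st.2).2)

def reduce_sat_to_3sat_alt (clauses : List (List String)) : List (List String) :=
  (clauses.foldl reduceStepB ([], 1)).1

-- ===== PRECONDITION & SPEC =====
-- Pre_ excludes inputs containing an EMPTY clause: there Python A raises IndexError
-- (clause[-1] while padding), so A returns on exactly the inputs Pre_ admits.
def Pre_reduce_sat_to_3sat (clauses : List (List String)) : Prop :=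
  ∀ c ∈ clauses, c ≠ []
instance (clauses : List (List String)) : Decidable (Pre_reduce_sat_to_3sat clauses) := by
  unfold Pre_reduce_sat_to_3sat; infer_instance

def pvWitness_reduce_sat_to_3sat : List (List String) :=
  [["a", "-b", "c", "d", "e"], ["p"], ["q", "-r"], ["x", "y", "z"]]

def Spec_reduce_sat_to_3sat (clauses : List (List String)) (out : List (List String)) : Prop :=
  out = reduce_sat_to_3sat_alt clauses
instance (clauses : List (List String)) (out : List (List String)) :
    Decidable (Spec_reduce_sat_to_3sat clauses out) := by
  unfold Spec_reduce_sat_to_3sat; infer_instance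

-- ===== CLAIM (what is proved, stated in full; the proofs are below) =====
def Claim_equal_reduce_sat_to_3sat : Prop :=
  ∀ (clauses : List (List String)), Dom_reduce_sat_to_3sat clauses →
    Pre_reduce_sat_to_3sat clauses →
    Spec_reduce_sat_to_3sat clauses (reduce_sat_to_3sat clauses)

-- ===== LEMMAS AND PROOFS =====

-- the fresh variable f"y{c}"
def yvar (c : Int) : String := "y" ++ PySem.Int.toStr c

-- closed form of A's >3 construction for one clause
def chunk (clause : List String) (c : Int) : List (List String) :=
  [clause.getD 0 "", clause.getD 1 "", yvar c] ::
  ((List.range (clause.length - 4)).map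
      (fun (j : Nat) => ["-" ++ yvar (c + (j : Int)), clause.getD (j + 2) "", yvar (c + (j : Int) + 1)]) ++
   [["-" ++ yvar (c + (clause.length - 4 : Nat)),
     clause.getD (clause.length - 2) "", clause.getD (clause.length - 1) ""]])

lemma yvar_shift (c : Int) (j : Nat) : yvar (c + ((j : Int) + 1)) = yvar (c + 1 + (j : Int)) := by
  congr 1
  ring

lemma chunk_cons (a b : String) (tail : List String) (c : Int) (h : 3 ≤ tail.length) :
    chunk (a :: b :: tail) c = [a, b, yvar c] :: chunk (("-" ++ yvar c) :: tail) (c + 1) := by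
  have e1 : (a :: b :: tail).length - 4 = (tail.length - 3) + 1 := by simp only [List.length_cons]; omega
  have e2 : (("-" ++ yvar c) :: tail).length - 4 = tail.length - 3 := by simp only [List.length_cons]; omega
  have hA : (a :: b :: tail).getD ((a :: b :: tail).length - 2) ""
      = tail.getD (tail.length - 2) "" := by
    have e : (a :: b :: tail).length - 2 = (tail.length - 2) + 1 + 1 := by simp only [List.length_cons]; omega
    rw [e, List.getD_cons_succ, List.getD_cons_succ]
  have hB : (a :: b :: tail).getD ((a :: b :: tail).length - 1) ""
      = tail.getD (tail.length - 1) "" := by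
    have e : (a :: b :: tail).length - 1 = (tail.length - 1) + 1 + 1 := by simp only [List.length_cons]; omega
    rw [e, List.getD_cons_succ, List.getD_cons_succ]
  have hC : (("-" ++ yvar c) :: tail).getD ((("-" ++ yvar c) :: tail).length - 2) ""
      = tail.getD (tail.length - 2) "" := by
    have e : (("-" ++ yvar c) :: tail).length - 2 = (tail.length - 2) + 1 := by simp only [List.length_cons]; omega
    rw [e, List.getD_cons_succ]
  have hD : (("-" ++ yvar c) :: tail).getD ((("-" ++ yvar c) :: tail).length - 1) ""
      = tail.getD (tail.length - 1) "" := by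
    have e : (("-" ++ yvar c) :: tail).length - 1 = (tail.length - 1) + 1 := by simp only [List.length_cons]; omega
    rw [e, List.getD_cons_succ]
  simp only [chunk, e1, e2, hA, hB, hC, hD, List.range_succ_eq_map, List.map_cons,
    List.map_map, List.cons_append]
  congr 1
  · simp
    exact ⟨fun j _ => ⟨yvar_shift c j, by congr 1; ring⟩, yvar_shift c (tail.length - 3)⟩

lemma splitB_eq_chunk : ∀ (n : Nat) (clause : List String) (c : Int),
    clause.length = n → 4 ≤ n →
    splitB clause c = (chunk clause c, c + ((n - 3 : Nat) : Int)) := by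
  intro n
  induction n using Nat.strong_induction_on with
  | _ n ih =>
    intro clause c hlen h4
    rcases clause with _ | ⟨a, rest⟩
    · simp at hlen; omega
    rcases rest with _ | ⟨b, tail⟩
    · simp at hlen; omega
    have htl : tail.length = n - 2 := by simp at hlen; omega
    rw [splitB]
    rw [if_neg (by simp only [List.length_cons]; omega),
        if_neg (by simp only [List.length_cons]; omega)]
    by_cases hn4 : n = 4
    · rcases tail with _ | ⟨t0, rest2⟩
      · simp at htl; omega
      rcases rest2 with _ | ⟨t1, rest3⟩
      · simp at htl; omega
      rcases rest3 with _ | ⟨t2, rest4⟩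
      swap
      · simp at htl; omega
      dsimp only
      rw [splitB]
      subst hn4
      all_goals simp [chunk, yvar]
    · have h5 : 5 ≤ n := by omega
      have hsub : splitB (("-" ++ ("y" ++ PySem.Int.toStr c)) :: tail) (c + 1)
          = (chunk (("-" ++ ("y" ++ PySem.Int.toStr c)) :: tail) (c + 1),
             (c + 1) + (((n - 1) - 3 : Nat) : Int)) := by
        apply ih (n - 1) (by omega) _ _ (by simp only [List.length_cons]; omega) (by omega)
      dsimp only
      rw [hsub]
      have hcc : chunk (a :: b :: tail) c
          = [a, b, yvar c] :: chunk (("-" ++ yvar c) :: tail) (c + 1) :=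
        chunk_cons a b tail c (by omega)
      have hy : yvar c = "y" ++ PySem.Int.toStr c := rfl
      rw [hcc, hy]
      refine Prod.ext rfl ?_
      show (c + 1) + (((n - 1) - 3 : Nat) : Int) = c + ((n - 3 : Nat) : Int)
      have : ((n - 1) - 3 : Nat) + 1 = (n - 3 : Nat) := by omega
      omega

lemma nvfold_eq (k : Nat) (c : Int) :
    (PySem.List.pyRange 0 (k : Int) 1).foldl
      (fun (p : List String × Int) _ => (p.1 ++ ["y" ++ PySem.Int.toStr p.2], p.2 + 1))
      ([], c)
    = ((List.range k).map (fun (i : Nat) => yvar (c + (i : Int))), c + k) := by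
  induction k with
  | zero => simp [PySem.List.pyRange_one_eq_nil]
  | succ k ih =>
    have hc : ((k + 1 : Nat) : Int) = (k : Int) + 1 := by push_cast; ring
    rw [hc, PySem.List.pyRange_one_succ_right (by positivity), List.foldl_append, ih]
    simp [List.range_succ, yvar]
    ring

lemma stepA_eq_chunk (st : List (List String) × Int) (clause : List String)
    (h : 4 ≤ clause.length) :
    reduceStepA st clause
      = (st.1 ++ chunk clause st.2, st.2 + ((clause.length - 3 : Nat) : Int)) := by
  obtain ⟨acc, c⟩ := st
  have h3 : ¬ clause.length = 3 := by omega
  have hlt : ¬ clause.length < 3 := by omega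
  unfold reduceStepA
  rw [if_neg h3, if_neg hlt]
  have hcast : ((clause.length : Int) - 3) = ((clause.length - 3 : Nat) : Int) := by omega
  rw [hcast, nvfold_eq]
  dsimp only
  set k := clause.length - 3 with hk
  have hk1 : 1 ≤ k := by omega
  set nvl := (List.range k).map (fun (i : Nat) => yvar (c + (i : Int))) with hnvl
  have hlen : nvl.length = k := by simp [hnvl]
  have hne : nvl ≠ [] := by
    intro hnil
    rw [hnil] at hlen
    simp at hlen
    omega
  have g0 : PySem.List.pyGetD nvl 0 "" = yvar c := by
    rw [PySem.List.pyGetD_zero, hnvl, PySem.List.getD_map_range _ _ _ _ (by omega)]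
    simp
  have gneg : PySem.List.pyGetD nvl (-1) "" = yvar (c + ((k - 1 : Nat) : Int)) := by
    rw [PySem.List.pyGetD_neg_one _ _ hne, List.getLast_eq_getElem]
    simp [hnvl]
  have gc0 : PySem.List.pyGetD clause 0 "" = clause.getD 0 "" := PySem.List.pyGetD_zero _ _
  have gc1 : PySem.List.pyGetD clause 1 "" = clause.getD 1 "" := PySem.List.pyGetD_ofNat' _ _ _
  have gm2 : PySem.List.pyGetD clause (-2) "" = clause.getD (clause.length - 2) "" := by
    rw [PySem.List.pyGetD_neg_ofNat clause 2 "" (by omega) (by omega),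
        List.getD_eq_getElem _ _ (by omega)]
  have gm1 : PySem.List.pyGetD clause (-1) "" = clause.getD (clause.length - 1) "" := by
    rw [PySem.List.pyGetD_neg_one _ _ (by intro hnil; rw [hnil] at h; simp at h),
        List.getLast_eq_getElem, List.getD_eq_getElem _ _ (by omega)]
  rw [PySem.List.foldl_append_singleton_eq_map, hlen, PySem.List.pyRange_one]
  have ht : ((k : Int) - 1).toNat = k - 1 := by omega
  rw [ht, List.map_map]
  have hmid : (List.range (k - 1)).map
      ((fun i => ["-" ++ PySem.List.pyGetD nvl (i - 1) "", PySem.List.pyGetD clause (i + 1) "",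
            PySem.List.pyGetD nvl i ""]) ∘ (fun (j : Nat) => (1 : Int) + (j : Int)))
      = (List.range (k - 1)).map (fun (j : Nat) =>
          ["-" ++ yvar (c + (j : Int)), clause.getD (j + 2) "", yvar (c + (j : Int) + 1)]) := by
    apply List.map_congr_left
    intro j hj
    have hjk : j < k - 1 := List.mem_range.mp hj
    have e1 : (1 : Int) + (j : Int) - 1 = ((j : Nat) : Int) := by ring
    have e2 : (1 : Int) + (j : Int) + 1 = ((j + 2 : Nat) : Int) := by push_cast; ring
    have e3 : (1 : Int) + (j : Int) = ((j + 1 : Nat) : Int) := by push_cast; ring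
    simp only [Function.comp_apply]
    rw [e1, e2, e3]
    simp only [PySem.List.pyGetD_natCast, hnvl]
    rw [PySem.List.getD_map_range _ _ _ _ (by omega),
        PySem.List.getD_map_range _ _ _ _ (by omega)]
    have e4 : ((j + 1 : Nat) : Int) = (j : Int) + 1 := by push_cast; ring
    rw [e4, ← add_assoc]
  rw [hmid]
  refine Prod.ext ?_ rfl
  have hk4 : k - 1 = clause.length - 4 := by omega
  simp only [chunk, g0, gneg, gc0, gc1, gm2, gm1, hk4, List.append_assoc, List.cons_append,
    List.nil_append]

lemma padA_eq_padB (c : List String) : padA c 3 = padB c := by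
  match c with
  | [] =>
    unfold padB; simp [padA, PySem.List.pyGet?, PySem.List.pyIdx?]
  | [a] =>
    unfold padB; simp; unfold padB; simp; unfold padB; simp
    simp [padA, PySem.List.pyGet?, PySem.List.pyIdx?]
  | [a, b] =>
    unfold padB; simp; unfold padB; simp
    simp [padA, PySem.List.pyGet?, PySem.List.pyIdx?]
  | a :: b :: d :: t =>
    unfold padB; simp [padA, show ¬ (t.length + 1 + 1 + 1 < 3) from by omega]

lemma step_eq : reduceStepA = reduceStepB := by
  funext st clause
  obtain ⟨acc, c⟩ := st
  match clause with
  | [] =>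
    simp only [reduceStepA, reduceStepB]
    rw [splitB]
    all_goals simp [padA_eq_padB]
  | [a] =>
    simp only [reduceStepA, reduceStepB]
    rw [splitB]
    all_goals simp [padA_eq_padB]
  | [a, b] =>
    simp only [reduceStepA, reduceStepB]
    rw [splitB]
    all_goals simp [padA_eq_padB]
  | [a, b, d] =>
    simp only [reduceStepA, reduceStepB]
    rw [splitB]
    all_goals simp
  | a :: b :: d :: e :: t =>
    have h4 : 4 ≤ (a :: b :: d :: e :: t).length := by simp
    simp only [reduceStepB]
    rw [stepA_eq_chunk ⟨acc, c⟩ _ h4,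
        splitB_eq_chunk (a :: b :: d :: e :: t).length _ c rfl h4]

-- ===== VERDICT (by name: the statement is the Claim_ definition above) =====
theorem reduce_sat_to_3sat_spec : Claim_equal_reduce_sat_to_3sat := by
  intro clauses _ _
  unfold Spec_reduce_sat_to_3sat reduce_sat_to_3sat reduce_sat_to_3sat_alt
  rw [step_eq]
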